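-- pv_equiv track=rewrite | github.com/modester-Aish/audit | audit_portal/routes.py | _meta_quality_stats
-- ===== SOURCE A (Python) =====
-- from typing import Any, Dict, List, Tuple
--
-- def _display_title_str(p: Dict[str, Any]) -> str:
--     return (str(p.get("display_title") or p.get("title") or "")).strip()
--
-- def _display_desc_str(p: Dict[str, Any]) -> str:
--     return (str(p.get("display_description") or p.get("meta_description") or "")).strip()
--
-- def _meta_quality_stats(pages: List[Dict[str, Any]]) -> Dict[str, Any]:
--     missing_title = sum(1 for p in pages if not _display_title_str(p))
--     missing_desc = sum(1 for p in pages if not _display_desc_str(p))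
--     title_long = sum(1 for p in pages if len(_display_title_str(p)) > 60)
--     desc_long = sum(1 for p in pages if len(_display_desc_str(p)) > 160)
--     return {
--         "missing_title": missing_title,
--         "missing_meta_description": missing_desc,
--         "title_over_60": title_long,
--         "description_over_160": desc_long,
--     }
-- ===== SOURCE B (Python) =====
-- from typing import Any, Dict, List
--
-- def _display_title_str(p: Dict[str, Any]) -> str:
--     return (str(p.get("display_title") or p.get("title") or "")).strip()
--
-- def _display_desc_str(p: Dict[str, Any]) -> str:
--     return (str(p.get("display_description") or p.get("meta_description") or "")).strip()
--
-- _KEYS = ("missing_title", "missing_meta_description", "title_over_60", "description_over_160")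
--
-- def _page_tags(p: Dict[str, Any]) -> List[str]:
--     """Emit one tag per quality issue found on this page."""
--     t = _display_title_str(p)
--     d = _display_desc_str(p)
--     tags = []
--     if not t:
--         tags.append("missing_title")
--     if not d:
--         tags.append("missing_meta_description")
--     if len(t) > 60:
--         tags.append("title_over_60")
--     if len(d) > 160:
--         tags.append("description_over_160")
--     return tags
--
-- def _meta_quality_stats(pages: List[Dict[str, Any]]) -> Dict[str, Any]:
--     # Flatten all issue tags into one stream and tally them with a counter dict.
--     tags = [tag for p in pages for tag in _page_tags(p)]
--     tally = {}
--     for tag in tags: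
--         tally[tag] = tally.get(tag, 0) + 1
--     return {k: tally.get(k, 0) for k in _KEYS}
-- ===== Notes on version B (the rewrite author's own statement) =====
-- stated objective: alternative
-- what changed: Replaces A's four boolean-sum passes with a tag-emission design: each page emits a list of issue tags, the flattened tag stream is tallied in a counter dict, and the result dict is read off the tally with default 0.
import Mathlib
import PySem

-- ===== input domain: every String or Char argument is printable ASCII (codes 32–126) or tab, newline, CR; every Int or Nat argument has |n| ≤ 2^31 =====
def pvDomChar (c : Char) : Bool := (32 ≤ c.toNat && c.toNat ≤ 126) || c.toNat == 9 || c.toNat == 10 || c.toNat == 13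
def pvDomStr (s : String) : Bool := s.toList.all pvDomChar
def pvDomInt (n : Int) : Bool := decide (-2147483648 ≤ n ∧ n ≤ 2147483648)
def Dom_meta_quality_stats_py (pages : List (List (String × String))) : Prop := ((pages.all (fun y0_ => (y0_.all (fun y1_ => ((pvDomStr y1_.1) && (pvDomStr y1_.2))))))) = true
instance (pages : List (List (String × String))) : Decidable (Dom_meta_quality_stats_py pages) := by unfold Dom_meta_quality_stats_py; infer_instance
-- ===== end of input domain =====

-- B replaces A's four boolean-sum passes by a tag-emission design: each page emits its issue tags,
-- the flattened tag stream is tallied in a counter dict, and the result is read off the tally.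

-- ===== PORT A =====
-- Python `x or y` on strings/None: first truthy value (None and "" are falsy).
def pvOrStr (o : Option String) (d : String) : String :=
  match o with
  | some s => if s = "" then d else s
  | none => d

def display_title_str (p : List (String × String)) : String :=
  PySem.Str.strip (pvOrStr ((PySem.Dict.mk p).get? "display_title") (pvOrStr ((PySem.Dict.mk p).get? "title") ""))

def display_desc_str (p : List (String × String)) : String :=
  PySem.Str.strip (pvOrStr ((PySem.Dict.mk p).get? "display_description") (pvOrStr ((PySem.Dict.mk p).get? "meta_description") ""))

def meta_quality_stats_py (pages : List (List (String × String))) : List (String × Int) :=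
  let missing_title : Int := pages.foldl (fun a p => if display_title_str p = "" then a + 1 else a) 0
  let missing_desc : Int := pages.foldl (fun a p => if display_desc_str p = "" then a + 1 else a) 0
  let title_long : Int := pages.foldl (fun a p => if PySem.Str.len (display_title_str p) > 60 then a + 1 else a) 0
  let desc_long : Int := pages.foldl (fun a p => if PySem.Str.len (display_desc_str p) > 160 then a + 1 else a) 0
  [("missing_title", missing_title), ("missing_meta_description", missing_desc),
   ("title_over_60", title_long), ("description_over_160", desc_long)]

-- ===== PORT B =====
def pvKeys : List String :=
  ["missing_title", "missing_meta_description", "title_over_60", "description_over_160"]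

-- one tag per quality issue found on this page
def page_tags (p : List (String × String)) : List String :=
  let t := display_title_str p
  let d := display_desc_str p
  let tags : List String := []
  let tags := if t = "" then tags ++ ["missing_title"] else tags
  let tags := if d = "" then tags ++ ["missing_meta_description"] else tags
  let tags := if PySem.Str.len t > 60 then tags ++ ["title_over_60"] else tags
  let tags := if PySem.Str.len d > 160 then tags ++ ["description_over_160"] else tags
  tags

def meta_quality_stats_py_alt (pages : List (List (String × String))) : List (String × Int) :=
  let tags := pages.flatMap page_tags
  let tally : PySem.Dict String Int :=
    tags.foldl (fun d x => d.insert x (d.getD x 0 + 1)) PySem.Dict.empty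
  pvKeys.map (fun k => (k, tally.getD k 0))

-- ===== PRECONDITION & SPEC =====
def Spec_meta_quality_stats_py (pages : List (List (String × String))) (out : List (String × Int)) : Prop := out = meta_quality_stats_py_alt pages
instance (pages : List (List (String × String))) (out : List (String × Int)) : Decidable (Spec_meta_quality_stats_py pages out) := by unfold Spec_meta_quality_stats_py; infer_instance

-- ===== CLAIM (what is proved, stated in full; the proofs are below) =====
def Claim_equal_meta_quality_stats_py : Prop := ∀ (pages : List (List (String × String))), Dom_meta_quality_stats_py pages → Spec_meta_quality_stats_py pages (meta_quality_stats_py pages)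

-- ===== LEMMAS AND PROOFS =====

-- page_tags on abstract title/description strings (page_tags p reduces to this by rfl)
def tagsOf (t d : String) : List String :=
  let tags : List String := []
  let tags := if t = "" then tags ++ ["missing_title"] else tags
  let tags := if d = "" then tags ++ ["missing_meta_description"] else tags
  let tags := if PySem.Str.len t > 60 then tags ++ ["title_over_60"] else tags
  let tags := if PySem.Str.len d > 160 then tags ++ ["description_over_160"] else tags
  tags

theorem page_tags_eq (p : List (String × String)) :
    page_tags p = tagsOf (display_title_str p) (display_desc_str p) := rfl

-- per-page tag counts: each key occurs in tagsOf t d exactly when its condition holds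
theorem pv_tags_title (t d : String) :
    (tagsOf t d).count "missing_title" = if t = "" then 1 else 0 := by
  unfold tagsOf
  by_cases h1 : t = "" <;> by_cases h2 : d = "" <;> simp [h1, h2] <;> split_ifs <;> rfl

theorem pv_tags_desc (t d : String) :
    (tagsOf t d).count "missing_meta_description" = if d = "" then 1 else 0 := by
  unfold tagsOf
  by_cases h1 : t = "" <;> by_cases h2 : d = "" <;> simp [h1, h2] <;> split_ifs <;> rfl

theorem pv_tags_tlong (t d : String) :
    (tagsOf t d).count "title_over_60" = if PySem.Str.len t > 60 then 1 else 0 := by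
  unfold tagsOf
  by_cases h1 : t = "" <;> by_cases h2 : d = "" <;> simp [h1, h2] <;> split_ifs <;> rfl

theorem pv_tags_dlong (t d : String) :
    (tagsOf t d).count "description_over_160" = if PySem.Str.len d > 160 then 1 else 0 := by
  unfold tagsOf
  by_cases h1 : t = "" <;> by_cases h2 : d = "" <;> simp [h1, h2] <;> split_ifs <;> rfl

-- A's boolean-sum loop equals the count of key k in the flattened tag stream
theorem pv_count (k : String) (cond : List (String × String) → Prop) [DecidablePred cond]
    (h : ∀ p, (page_tags p).count k = if cond p then 1 else 0) (pages : List (List (String × String))) :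
    pages.foldl (fun a p => if cond p then a + 1 else a) (0 : Int)
      = ((pages.flatMap page_tags).count k : Int) := by
  have hc := PySem.List.foldl_count_if (fun p => decide (cond p)) pages 0
  simp only [decide_eq_true_eq] at hc
  rw [hc, zero_add]
  congr 1
  clear hc
  induction pages with
  | nil => simp
  | cons p ps ih =>
    rw [List.flatMap_cons, List.count_append, List.countP_cons, ih, h p]
    by_cases hp : cond p <;> simp [hp] <;> omega

-- ===== VERDICT (by name: the statement is the Claim_ definition above) =====
theorem meta_quality_stats_py_spec : Claim_equal_meta_quality_stats_py := by
  intro pages _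
  unfold Spec_meta_quality_stats_py meta_quality_stats_py meta_quality_stats_py_alt pvKeys
  simp only [List.map_cons, List.map_nil, PySem.Dict.getD_foldl_insert_add_one,
    PySem.Dict.getD_empty, zero_add]
  rw [pv_count "missing_title" _ (fun p => by rw [page_tags_eq, pv_tags_title]),
      pv_count "missing_meta_description" _ (fun p => by rw [page_tags_eq, pv_tags_desc]),
      pv_count "title_over_60" _ (fun p => by rw [page_tags_eq, pv_tags_tlong]),
      pv_count "description_over_160" _ (fun p => by rw [page_tags_eq, pv_tags_dlong])]
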